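-- pv_equiv track=rewrite | github.com/S0jer/algorithms-and-data-structures-course-2022 | ASD_Summer/P6/egzP6a/egzP6atesty.py | check
-- ===== SOURCE A (Python) =====
-- def check(T, hint, sol):
--     #97, 122
--     passed = True
--     if len(hint) != len(sol):
--         return False
--     if not sol in T:
--         return False
--     letters = 0
--     for i in range(len(hint)):
--         if ord(hint[i]) >= 97 and ord(hint[i]) <= 122:
--             letters += 1
--         if ord(sol[i]) >= 97 and ord(sol[i]) <= 122:
--             letters -= 1
--     if letters != 0:
--         return False
--     return True
-- ===== SOURCE B (Python) =====
-- def check(T, hint, sol):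
--     if len(hint) != len(sol):
--         return False
--     if sol not in T:
--         return False
--     # two-pointer scan: pair the k-th lowercase char of hint with the k-th of sol;
--     # valid iff both scans exhaust their strings together
--     i, j, n = 0, 0, len(hint)
--     while True:
--         while i < n and not (97 <= ord(hint[i]) <= 122):
--             i += 1
--         while j < n and not (97 <= ord(sol[j]) <= 122):
--             j += 1
--         if i == n or j == n:
--             return i == n and j == n
--         i += 1
--         j += 1
-- ===== Notes on version B (the rewrite author's own statement) =====
-- stated objective: alternative
-- what changed: Replaces A's single counter loop (running +1/-1 difference tested for zero) by a two-pointer co-advancing scan that pairs the k-th lowercase-ASCII occurrence of hint with the k-th of sol and succeeds iff both scans exhaust together, with no counter.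
import Mathlib
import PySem

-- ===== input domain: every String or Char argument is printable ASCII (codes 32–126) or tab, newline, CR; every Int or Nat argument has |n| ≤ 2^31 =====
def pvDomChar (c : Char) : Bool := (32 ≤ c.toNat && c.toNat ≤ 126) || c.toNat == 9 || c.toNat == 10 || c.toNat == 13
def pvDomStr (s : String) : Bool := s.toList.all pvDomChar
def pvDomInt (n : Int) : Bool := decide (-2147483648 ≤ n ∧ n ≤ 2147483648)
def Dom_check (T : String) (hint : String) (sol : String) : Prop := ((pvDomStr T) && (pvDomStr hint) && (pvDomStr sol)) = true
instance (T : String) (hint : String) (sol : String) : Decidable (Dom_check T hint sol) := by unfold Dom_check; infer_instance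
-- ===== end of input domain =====

-- B replaces A's running +1/-1 counter by a two-pointer co-advancing scan that
-- pairs lowercase-ASCII occurrences of hint and sol (objective: alternative).

-- ===== PORT A =====
-- indexing hint[i]/sol[i]: i always in range inside the loop, so pyGetD with a
-- dummy default is exact here
def check (T : String) (hint : String) (sol : String) : Bool :=
  if PySem.Str.len hint ≠ PySem.Str.len sol then false
  else if ¬ PySem.Str.isIn sol T then false
  else
    let letters : Int :=
      (PySem.List.pyRange 0 (PySem.Str.len hint) 1).foldl
        (fun (acc : Int) (i : Int) =>
          let acc1 := if 97 ≤ (PySem.List.pyGetD hint.toList i ' ').toNat ∧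
                         (PySem.List.pyGetD hint.toList i ' ').toNat ≤ 122 then acc + 1 else acc
          if 97 ≤ (PySem.List.pyGetD sol.toList i ' ').toNat ∧
             (PySem.List.pyGetD sol.toList i ' ').toNat ≤ 122 then acc1 - 1 else acc1) 0
    if letters ≠ 0 then false else true

-- ===== PORT B =====
def isLowerAscii (c : Char) : Bool := 97 ≤ c.toNat && c.toNat ≤ 122

-- the inner `while` loops that advance a pointer past non-lowercase chars are
-- transcribed as dropWhile on the remaining suffix; the outer loop is pvScan
def pvScan (h s : List Char) : Bool :=
  match hh : h.dropWhile (fun c => !isLowerAscii c), hs : s.dropWhile (fun c => !isLowerAscii c) with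
  | [], [] => true
  | [], _ :: _ => false
  | _ :: _, [] => false
  | _ :: ht, _ :: st => pvScan ht st
termination_by h.length + s.length
decreasing_by
  have h1 : (h.dropWhile (fun c => !isLowerAscii c)).length ≤ h.length := h.length_dropWhile_le _
  have h2 : (s.dropWhile (fun c => !isLowerAscii c)).length ≤ s.length := s.length_dropWhile_le _
  rw [hh] at h1; rw [hs] at h2; simp at h1 h2; omega

def check_alt (T : String) (hint : String) (sol : String) : Bool :=
  if PySem.Str.len hint ≠ PySem.Str.len sol then false
  else if ¬ PySem.Str.isIn sol T then false
  else pvScan hint.toList sol.toList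

-- ===== PRECONDITION & SPEC =====
def Spec_check (T : String) (hint : String) (sol : String) (out : Bool) : Prop := out = check_alt T hint sol
instance (T : String) (hint : String) (sol : String) (out : Bool) : Decidable (Spec_check T hint sol out) := by unfold Spec_check; infer_instance

-- ===== CLAIM (what is proved, stated in full; the proofs are below) =====
def Claim_equal_check : Prop := ∀ (T : String) (hint : String) (sol : String), Dom_check T hint sol → Spec_check T hint sol (check T hint sol)

-- ===== LEMMAS AND PROOFS =====

theorem countP_dropWhile_not (l : List Char) :
    (l.dropWhile (fun c => !isLowerAscii c)).countP isLowerAscii = l.countP isLowerAscii := by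
  induction l with
  | nil => rfl
  | cons c t ih =>
    by_cases hc : isLowerAscii c = true
    · simp [List.dropWhile, hc, List.countP_cons]
    · simp only [Bool.eq_false_iff] at hc
      simp [List.dropWhile, Bool.eq_false_iff.mpr hc, List.countP_cons, hc, ih]

theorem head_dropWhile_lower {l t : List Char} {c : Char}
    (h : l.dropWhile (fun d => !isLowerAscii d) = c :: t) : isLowerAscii c = true := by
  induction l with
  | nil => simp [List.dropWhile] at h
  | cons a u ih =>
    rw [List.dropWhile_cons] at h
    by_cases ha : isLowerAscii a = true
    · simp [ha] at h; rw [← h.1]; exact ha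
    · simp [ha] at h; exact ih h

theorem pvScan_eq_count (h s : List Char) :
    pvScan h s = (h.countP isLowerAscii == s.countP isLowerAscii) := by
  fun_induction pvScan h s with
  | case1 h s hh hs =>
    have c1 := countP_dropWhile_not h
    have c2 := countP_dropWhile_not s
    rw [hh] at c1; rw [hs] at c2
    simp [← c1, ← c2]
  | case2 h s c t hh hs =>
    have c1 := countP_dropWhile_not h
    have c2 := countP_dropWhile_not s
    rw [hh] at c1; rw [hs] at c2
    have hc := head_dropWhile_lower hs
    simp [← c1, ← c2, List.countP_cons, hc]
  | case3 h s c t hh hs =>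
    have c1 := countP_dropWhile_not h
    have c2 := countP_dropWhile_not s
    rw [hh] at c1; rw [hs] at c2
    have hc := head_dropWhile_lower hh
    simp [← c1, ← c2, List.countP_cons, hc]
  | case4 h s ch ht cs st hh hs ih =>
    have c1 := countP_dropWhile_not h
    have c2 := countP_dropWhile_not s
    rw [hh] at c1; rw [hs] at c2
    have hch := head_dropWhile_lower hh
    have hcs := head_dropWhile_lower hs
    rw [ih, ← c1, ← c2]
    simp [List.countP_cons, hch, hcs]

theorem fold_count (h s : List Char) (n : Nat) (hn : n ≤ h.length) (hs : n ≤ s.length) :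
    (PySem.List.pyRange 0 (n : Int) 1).foldl
        (fun (acc : Int) (i : Int) =>
          let acc1 := if 97 ≤ (PySem.List.pyGetD h i ' ').toNat ∧
                         (PySem.List.pyGetD h i ' ').toNat ≤ 122 then acc + 1 else acc
          if 97 ≤ (PySem.List.pyGetD s i ' ').toNat ∧
             (PySem.List.pyGetD s i ' ').toNat ≤ 122 then acc1 - 1 else acc1) 0
      = ((h.take n).countP isLowerAscii : Int) - ((s.take n).countP isLowerAscii : Int) := by
  induction n with
  | zero => simp [PySem.List.pyRange_one_eq_nil]
  | succ m ih =>
    have hm : m ≤ h.length := Nat.le_of_succ_le hn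
    have hsm : m ≤ s.length := Nat.le_of_succ_le hs
    have hcast : ((m + 1 : Nat) : Int) = (m : Int) + 1 := by push_cast; ring
    rw [hcast, PySem.List.pyRange_one_succ_right (by positivity), List.foldl_append,
        ih hm hsm]
    have hh : PySem.List.pyGetD h (m : Int) ' ' = h[m]'(hn) := by
      simp [PySem.List.pyGetD_natCast, List.getD_eq_getElem?_getD, List.getElem?_eq_getElem hn]
    have hss : PySem.List.pyGetD s (m : Int) ' ' = s[m]'(hs) := by
      simp [PySem.List.pyGetD_natCast, List.getD_eq_getElem?_getD, List.getElem?_eq_getElem hs]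
    have th : h.take (m + 1) = h.take m ++ [h[m]'(hn)] := by
      rw [List.take_add_one]; simp [List.getElem?_eq_getElem hn]
    have ts : s.take (m + 1) = s.take m ++ [s[m]'(hs)] := by
      rw [List.take_add_one]; simp [List.getElem?_eq_getElem hs]
    simp only [List.foldl_cons, List.foldl_nil, hh, hss, th, ts, List.countP_append,
      List.countP_cons, List.countP_nil, isLowerAscii]
    by_cases h1 : 97 ≤ (h[m]'(hn)).toNat ∧ (h[m]'(hn)).toNat ≤ 122 <;>
      by_cases h2 : 97 ≤ (s[m]'(hs)).toNat ∧ (s[m]'(hs)).toNat ≤ 122 <;>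
      simp [h1, h2, decide_eq_true_eq] <;> omega

theorem check_eq (T hint sol : String) : check T hint sol = check_alt T hint sol := by
  rw [check, check_alt]
  by_cases hlen : PySem.Str.len hint = PySem.Str.len sol
  · rw [if_neg (not_not_intro hlen), if_neg (not_not_intro hlen)]
    have hlenN : hint.length = sol.length := by
      have h2 : (hint.length : Int) = (sol.length : Int) := by simpa using hlen
      exact_mod_cast h2
    by_cases hin : PySem.Str.isIn sol T = true
    · rw [if_neg (not_not_intro hin), if_neg (not_not_intro hin)]
      have hl : hint.toList.length = sol.toList.length := by simpa using hlenN
      have key := fold_count hint.toList sol.toList hint.toList.length le_rfl (le_of_eq hl)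
      rw [List.take_length, hl, List.take_length] at key
      have hr : PySem.Str.len hint = (sol.toList.length : Int) := by simp [← hl]
      rw [hr, key, pvScan_eq_count]
      by_cases hc : List.countP isLowerAscii hint.toList = List.countP isLowerAscii sol.toList
      · simp [hc]
      · have hne : (List.countP isLowerAscii hint.toList : Int) -
            (List.countP isLowerAscii sol.toList : Int) ≠ 0 := by omega
        simp [hc, hne]
    · rw [if_pos hin, if_pos hin]
  · rw [if_pos hlen, if_pos hlen]
-- ===== VERDICT (by name: the statement is the Claim_ definition above) =====
theorem check_spec : Claim_equal_check := by
  intro T hint sol _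
  unfold Spec_check
  exact check_eq T hint sol
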